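-- pv_equiv track=rewrite | github.com/madsthoisen/advent_of_code | 2015/dec21/solution.py | play
-- ===== SOURCE A (Python) =====
-- def play(player, boss):
--     hp = 100
--     while True:
--         boss[0] -= max(player[0] - boss[2], 0)
--         if boss[0] <= 0:
--             return True
--         hp -= max(boss[1] - player[1], 0)
--         if hp <= 0:
--             return False
-- ===== SOURCE B (Python) =====
-- def play(player, boss):
--     # Closed form: compare the number of turns each side needs to kill the other.
--     # Note: unlike A, B does not mutate boss[0]; equivalence is about the return value.
--     pd = max(player[0] - boss[2], 0)
--     bd = max(boss[1] - player[1], 0)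
--     hp_boss = boss[0]
--     if pd == 0:
--         return hp_boss <= 0
--     turns_player = max(-(-hp_boss // pd), 1)
--     if bd == 0:
--         return True
--     turns_boss = max(-(-100 // bd), 1)
--     return turns_player <= turns_boss
-- ===== Notes on version B (the rewrite author's own statement) =====
-- stated objective: alternative
-- what changed: Replaces the round-by-round combat loop with a closed-form comparison of ceiling-division turn counts for each side.
-- outside the precondition, e.g. on play([45], [5, 6, 9]): A returns True, B raises IndexError
import Mathlib
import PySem

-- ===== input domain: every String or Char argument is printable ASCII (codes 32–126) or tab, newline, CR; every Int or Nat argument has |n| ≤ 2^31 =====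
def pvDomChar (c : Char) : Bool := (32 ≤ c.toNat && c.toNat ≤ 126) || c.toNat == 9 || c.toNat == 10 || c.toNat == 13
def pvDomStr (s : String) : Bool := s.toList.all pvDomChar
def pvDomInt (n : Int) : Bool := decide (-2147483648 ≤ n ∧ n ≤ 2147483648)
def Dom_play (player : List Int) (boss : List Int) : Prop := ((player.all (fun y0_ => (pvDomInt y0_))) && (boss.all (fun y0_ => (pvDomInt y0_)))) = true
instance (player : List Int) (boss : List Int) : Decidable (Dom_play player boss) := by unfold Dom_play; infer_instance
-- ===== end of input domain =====

-- B replaces A's round-by-round combat loop with a closed-form comparison of ceiling-division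
-- turn counts. A mutates boss[0] in place; B does not -- the equivalence proved here is about
-- the return value only.


-- ===== PORT A =====
-- A's while-True loop, with fuel large enough to cover every run that terminates under Pre_
def playLoopA (pd bd : Int) (b0 hp : Int) (fuel : Nat) : Bool :=
  match fuel with
  | 0 => false
  | fuel + 1 =>
    let b0' := b0 - pd
    if b0' ≤ 0 then true
    else
      let hp' := hp - bd
      if hp' ≤ 0 then false
      else playLoopA pd bd b0' hp' fuel

def play (player : List Int) (boss : List Int) : Bool :=
  let pd := max (player.getD 0 0 - boss.getD 2 0) 0
  let bd := max (boss.getD 1 0 - player.getD 1 0) 0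
  playLoopA pd bd (boss.getD 0 0) 100 ((boss.getD 0 0).toNat + 101)

-- ===== PORT B =====
def play_alt (player : List Int) (boss : List Int) : Bool :=
  let pd := max (player.getD 0 0 - boss.getD 2 0) 0
  let bd := max (boss.getD 1 0 - player.getD 1 0) 0
  let hpBoss := boss.getD 0 0
  if pd = 0 then decide (hpBoss ≤ 0)
  else
    let turnsPlayer := max (-(PySem.Int.floordiv (-hpBoss) pd)) 1
    if bd = 0 then true
    else
      let turnsBoss := max (-(PySem.Int.floordiv (-(100 : Int)) bd)) 1
      decide (turnsPlayer ≤ turnsBoss)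

-- ===== PRECONDITION & SPEC =====
-- Pre_ excludes under-length lists, on which A usually raises IndexError but can return True
-- before ever reading player[1] when the boss dies in round one (B reads all stats upfront and
-- raises there), and inputs where A never returns (boss hp positive, neither side deals damage).
def Pre_play (player : List Int) (boss : List Int) : Prop :=
  2 ≤ player.length ∧ 3 ≤ boss.length ∧
  ¬ (0 < boss.getD 0 0 ∧ player.getD 0 0 ≤ boss.getD 2 0 ∧ boss.getD 1 0 ≤ player.getD 1 0)
instance (player : List Int) (boss : List Int) : Decidable (Pre_play player boss) := by
  unfold Pre_play; infer_instance
def pvWitness_play : List Int × List Int := ([8, 2], [104, 9, 3])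

def Spec_play (player : List Int) (boss : List Int) (out : Bool) : Prop := out = play_alt player boss
instance (player : List Int) (boss : List Int) (out : Bool) : Decidable (Spec_play player boss out) := by unfold Spec_play; infer_instance

-- ===== CLAIM (what is proved, stated in full; the proofs are below) =====
def Claim_equal_play : Prop := ∀ (player : List Int) (boss : List Int), Dom_play player boss → Pre_play player boss → Spec_play player boss (play player boss)

-- ===== LEMMAS AND PROOFS =====

-- closed-form value of the loop, generalized over the player's current hp
def win (pd bd b0 hp : Int) : Bool :=
  if pd = 0 then decide (b0 ≤ 0)
  else if bd = 0 then true
  else decide (max (-(PySem.Int.floordiv (-b0) pd)) 1 ≤ max (-(PySem.Int.floordiv (-hp) bd)) 1)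

theorem ceil_le_one {a b : Int} (hb : 0 < b) (h : a ≤ b) :
    -(PySem.Int.floordiv (-a) b) ≤ 1 := by
  by_cases hc : 0 < a
  · have := (PySem.Int.neg_floordiv_neg_eq_iff_of_pos (a := a) (b := b) (q := 1) hb).2
      ⟨by nlinarith, by nlinarith⟩
    omega
  · have := (PySem.Int.le_floordiv_iff_mul_le (a := -a) (b := b) (q := 0) hb).2 (by omega)
    omega

theorem ceil_ge_two {a b : Int} (hb : 0 < b) (h : b < a) :
    2 ≤ -(PySem.Int.floordiv (-a) b) := by
  by_contra hlt
  rw [not_le] at hlt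
  have hq := (PySem.Int.le_floordiv_iff_mul_le (a := -a) (b := b)
    (q := PySem.Int.floordiv (-a) b) hb).1 le_rfl
  have h2 : (-1 : Int) * b ≤ PySem.Int.floordiv (-a) b * b :=
    mul_le_mul_of_nonneg_right (by omega) (le_of_lt hb)
  linarith [hq, h2]

theorem ceil_shift {a b : Int} (hb : 0 < b) :
    -(PySem.Int.floordiv (-(a - b)) b) = -(PySem.Int.floordiv (-a) b) - 1 := by
  have h1 := (PySem.Int.floordiv_eq_iff_of_pos (a := -a) (b := b)
    (q := PySem.Int.floordiv (-a) b) hb).1 rfl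
  have h2 : PySem.Int.floordiv (-(a - b)) b = PySem.Int.floordiv (-a) b + 1 := by
    apply (PySem.Int.floordiv_eq_iff_of_pos hb).2
    refine ⟨?_, ?_⟩
    · have e : (PySem.Int.floordiv (-a) b + 1) * b = PySem.Int.floordiv (-a) b * b + b := by ring
      rw [e]; linarith [h1.1]
    · have e : (PySem.Int.floordiv (-a) b + 1 + 1) * b = (PySem.Int.floordiv (-a) b + 1) * b + b := by ring
      have e2 : (PySem.Int.floordiv (-a) b + 1) * b = PySem.Int.floordiv (-a) b * b + b := by ring
      rw [e, e2]; linarith [h1.2]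
  omega

theorem playLoopA_eq_win (pd bd : Int) (hpd : 0 ≤ pd) (hbd : 0 ≤ bd) (hpos : 0 < pd ∨ 0 < bd) :
    ∀ (fuel : Nat) (b0 hp : Int), 1 ≤ hp → b0.toNat + hp.toNat < fuel →
      playLoopA pd bd b0 hp fuel = win pd bd b0 hp := by
  intro fuel
  induction fuel with
  | zero => intro b0 hp _ hf; omega
  | succ n ih =>
    intro b0 hp hhp hf
    show (if b0 - pd ≤ 0 then true
          else if hp - bd ≤ 0 then false
          else playLoopA pd bd (b0 - pd) (hp - bd) n) = win pd bd b0 hp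
    by_cases hdead : b0 - pd ≤ 0
    · rw [if_pos hdead]
      by_cases hpd0 : pd = 0
      · simp only [win, if_pos hpd0]
        symm; rw [decide_eq_true_iff]; omega
      · simp only [win, if_neg hpd0]
        by_cases hbd0 : bd = 0
        · rw [if_pos hbd0]
        · rw [if_neg hbd0]
          have h1 := ceil_le_one (a := b0) (b := pd) (by omega) (by omega)
          symm; rw [decide_eq_true_iff]
          generalize -(PySem.Int.floordiv (-b0) pd) = x at h1 ⊢
          generalize -(PySem.Int.floordiv (-hp) bd) = y
          omega
    · rw [if_neg hdead]
      by_cases hkill : hp - bd ≤ 0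
      · rw [if_pos hkill]
        by_cases hpd0 : pd = 0
        · simp only [win, if_pos hpd0]
          symm; rw [decide_eq_false_iff_not]; omega
        · simp only [win, if_neg hpd0, if_neg (by omega : bd ≠ 0)]
          have h1 := ceil_ge_two (a := b0) (b := pd) (by omega) (by omega)
          have h2 := ceil_le_one (a := hp) (b := bd) (by omega) (by omega)
          symm; rw [decide_eq_false_iff_not]
          generalize -(PySem.Int.floordiv (-b0) pd) = x at h1 ⊢
          generalize -(PySem.Int.floordiv (-hp) bd) = y at h2 ⊢
          omega
      · rw [if_neg hkill]
        have hfuel2 : (b0 - pd).toNat + (hp - bd).toNat < n := by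
          rcases hpos with h | h <;> omega
        rw [ih (b0 - pd) (hp - bd) (by omega) hfuel2]
        by_cases hpd0 : pd = 0
        · simp [win, hpd0]
        · by_cases hbd0 : bd = 0
          · simp [win, hpd0, hbd0]
          · simp only [win, if_neg hpd0, if_neg hbd0]
            have hs1 := ceil_shift (a := b0) (b := pd) (by omega)
            have hs2 := ceil_shift (a := hp) (b := bd) (by omega)
            have h1 := ceil_ge_two (a := b0) (b := pd) (by omega) (by omega)
            have h2 := ceil_ge_two (a := hp) (b := bd) (by omega) (by omega)
            rw [hs1, hs2]
            rw [decide_eq_decide]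
            generalize -(PySem.Int.floordiv (-b0) pd) = x at h1 ⊢
            generalize -(PySem.Int.floordiv (-hp) bd) = y at h2 ⊢
            omega

theorem play_bridge (pd bd b0 : Int) (hpd : 0 ≤ pd) (hbd : 0 ≤ bd)
    (hok : 0 < pd ∨ 0 < bd ∨ b0 ≤ 0) :
    playLoopA pd bd b0 100 (b0.toNat + 101) =
      (if pd = 0 then decide (b0 ≤ 0)
       else if bd = 0 then true
       else decide (max (-(PySem.Int.floordiv (-b0) pd)) 1 ≤
                    max (-(PySem.Int.floordiv (-(100 : Int)) bd)) 1)) := by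
  by_cases hpos : 0 < pd ∨ 0 < bd
  · rw [playLoopA_eq_win pd bd hpd hbd hpos _ b0 100 (by omega) (by omega)]
    rfl
  · have hpd0 : pd = 0 := by omega
    have hbd0 : bd = 0 := by omega
    have hb0 : b0 ≤ 0 := by
      rcases hok with h | h | h
      · omega
      · omega
      · exact h
    rw [show b0.toNat + 101 = (b0.toNat + 100) + 1 from by omega]
    show (if b0 - pd ≤ 0 then true
          else if (100 : Int) - bd ≤ 0 then false
          else playLoopA pd bd (b0 - pd) (100 - bd) (b0.toNat + 100)) = _
    rw [if_pos (by omega), if_pos hpd0]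
    symm; rw [decide_eq_true_iff]; exact hb0

-- ===== VERDICT (by name: the statement is the Claim_ definition above) =====
theorem play_spec : Claim_equal_play := by
  intro player boss _ hpre
  obtain ⟨_, _, hnd⟩ := hpre
  have hok : 0 < max (player.getD 0 0 - boss.getD 2 0) 0 ∨
      0 < max (boss.getD 1 0 - player.getD 1 0) 0 ∨ boss.getD 0 0 ≤ 0 := by
    rcases le_or_gt (player.getD 0 0) (boss.getD 2 0) with h1 | h1
    · rcases le_or_gt (boss.getD 1 0) (player.getD 1 0) with h2 | h2
      · right; right; omega
      · right; left; omega
    · left; omega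
  exact play_bridge _ _ _ (le_max_right _ _) (le_max_right _ _) hok
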